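-- pv_equiv track=rewrite | github.com/jas320/advent_of_code_challenges | 2020/day18.py | next_char_not_plus
-- ===== SOURCE A (Python) =====
-- def next_char_not_plus(line, idx):
--     while idx < len(line):
--         next_char = line[idx]
--         if next_char != " ":
--             if next_char != "+":
--                 return True
--             else:
--                 return False
--         idx += 1
--     return True
-- ===== SOURCE B (Python) =====
-- def next_char_not_plus(line, idx):
--     return not line[idx:].strip(' ').startswith('+')
-- ===== Notes on version B (the rewrite author's own statement) =====
-- stated objective: simpler
-- what changed: B replaces A's index-incrementing while loop with a single slice-strip-prefix expression: not line[idx:].strip(' ').startswith('+').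
-- intended difference: For negative idx whose suffix line[idx:] is all spaces while line itself has '+' as its first non-space character, A's incremented negative index crosses 0 and accidentally rescans the string from the start, returning False; B returns True, the intended value since there is no non-space character at or after position idx. — e.g. on next_char_not_plus("+ ", -1): A returns false, B returns true
import Mathlib
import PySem

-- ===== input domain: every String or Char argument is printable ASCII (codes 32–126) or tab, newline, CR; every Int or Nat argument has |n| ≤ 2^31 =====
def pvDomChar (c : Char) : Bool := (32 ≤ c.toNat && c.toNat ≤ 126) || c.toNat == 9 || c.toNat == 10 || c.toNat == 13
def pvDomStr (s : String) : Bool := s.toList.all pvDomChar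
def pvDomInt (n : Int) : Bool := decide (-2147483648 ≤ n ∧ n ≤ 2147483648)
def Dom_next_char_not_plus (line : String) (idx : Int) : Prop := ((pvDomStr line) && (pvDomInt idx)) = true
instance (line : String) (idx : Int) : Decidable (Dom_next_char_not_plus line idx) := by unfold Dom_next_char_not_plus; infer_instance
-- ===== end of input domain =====

-- B replaces A's index-incrementing space-skipping while loop by one slice-strip-prefix
-- expression: not line[idx:].strip(' ').startswith('+').  (Objective: simpler.)

-- ===== PORT A =====
-- A's while loop, one fuel step per iteration; line[idx] is pyGet? (negative idx wraps,
-- none = IndexError, excluded by Pre_; the `none => true` arm is never reached inside Pre_).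
def nextCharLoopA (cs : List Char) (idx : Int) : Nat → Bool
  | 0 => true
  | fuel + 1 =>
    if idx < (cs.length : Int) then
      match PySem.List.pyGet? cs idx with
      | none => true
      | some c =>
        if c ≠ ' ' then
          (if c ≠ '+' then true else false)
        else nextCharLoopA cs (idx + 1) fuel
    else true

def next_char_not_plus (line : String) (idx : Int) : Bool :=
  nextCharLoopA line.toList idx ((line.toList.length : Int) - idx).toNat

-- ===== PORT B =====
def next_char_not_plus_alt (line : String) (idx : Int) : Bool :=
  !(PySem.Str.startswith (PySem.Str.stripChars (PySem.Str.slice line (some idx) none) " ") "+")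

-- ===== PRECONDITION & SPEC =====
-- Pre_ excludes exactly idx < -len(line), where A's line[idx] raises IndexError.
def Pre_next_char_not_plus (line : String) (idx : Int) : Prop :=
  -(line.toList.length : Int) ≤ idx
instance (line : String) (idx : Int) : Decidable (Pre_next_char_not_plus line idx) := by
  unfold Pre_next_char_not_plus; infer_instance
def pvWitness_next_char_not_plus : String × Int := ("a + b", 1)

-- For negative idx whose suffix line[idx:] is all spaces while line itself has '+' as its
-- first non-space character, A's incremented negative index crosses 0 and accidentally
-- rescans the string from the start, returning False; B returns True, the intended value
-- since there is no non-space character at or after position idx.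
def D_next_char_not_plus (line : String) (idx : Int) : Prop :=
  idx < 0 ∧ -(line.toList.length : Int) ≤ idx ∧
  (line.toList.drop (line.toList.length - (-idx).toNat)).all (· == ' ') = true ∧
  (line.toList.dropWhile (· == ' ')).head? = some '+'
instance (line : String) (idx : Int) : Decidable (D_next_char_not_plus line idx) := by
  unfold D_next_char_not_plus; infer_instance

def Spec_next_char_not_plus (line : String) (idx : Int) (out : Bool) : Prop :=
  ¬ D_next_char_not_plus line idx → out = next_char_not_plus_alt line idx
instance (line : String) (idx : Int) (out : Bool) : Decidable (Spec_next_char_not_plus line idx out) := by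
  unfold Spec_next_char_not_plus; infer_instance

def pvDiffWitness_next_char_not_plus : String × Int := ("+ ", -1)
def pvDiffWitnessOut_next_char_not_plus : Bool × Bool := (false, true)

-- ===== CLAIM (what is proved, stated in full; the proofs are below) =====
def Claim_unchanged_next_char_not_plus : Prop := ∀ (line : String) (idx : Int), Dom_next_char_not_plus line idx → Pre_next_char_not_plus line idx → Spec_next_char_not_plus line idx (next_char_not_plus line idx)
def Claim_changed_next_char_not_plus : Prop := Dom_next_char_not_plus (pvDiffWitness_next_char_not_plus.1) (pvDiffWitness_next_char_not_plus.2) ∧ Pre_next_char_not_plus (pvDiffWitness_next_char_not_plus.1) (pvDiffWitness_next_char_not_plus.2) ∧ D_next_char_not_plus (pvDiffWitness_next_char_not_plus.1) (pvDiffWitness_next_char_not_plus.2) ∧ next_char_not_plus (pvDiffWitness_next_char_not_plus.1) (pvDiffWitness_next_char_not_plus.2) = pvDiffWitnessOut_next_char_not_plus.1 ∧ next_char_not_plus_alt (pvDiffWitness_next_char_not_plus.1) (pvDiffWitness_next_char_not_plus.2) = pvDiffWitnessOut_next_char_not_plus.2 ∧ pvDiffWitnessOut_next_char_not_plus.1 ≠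 pvDiffWitnessOut_next_char_not_plus.2
def Claim_exact_next_char_not_plus : Prop := ∀ (line : String) (idx : Int), Dom_next_char_not_plus line idx → Pre_next_char_not_plus line idx → D_next_char_not_plus line idx → next_char_not_plus line idx ≠ next_char_not_plus_alt line idx

-- ===== LEMMAS AND PROOFS =====

-- The common value: True iff the first non-space character of cs (if any) is not '+'.
def gNCP (cs : List Char) : Bool :=
  !((cs.dropWhile (· == ' ')).head? == some '+')

theorem gNCP_nonspace (c : Char) (cs : List Char) (h : (c == ' ') = false) :
    gNCP (c :: cs) = (if c ≠ '+' then true else false) := by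
  simp only [gNCP, List.dropWhile_cons, h, Bool.false_eq_true, if_false, List.head?_cons]
  by_cases hp : c = '+' <;> simp [hp]

theorem gNCP_space (cs : List Char) : gNCP (' ' :: cs) = gNCP cs := by
  simp [gNCP, List.dropWhile_cons]

theorem gNCP_allspace (cs : List Char) (h : cs.all (· == ' ') = true) : gNCP cs = true := by
  have : cs.dropWhile (· == ' ') = [] :=
    List.dropWhile_eq_nil_iff.mpr (fun x hx => List.all_eq_true.mp h x hx)
  simp [gNCP, this]

theorem startswith_plus (l : List Char) : PySem.Chars.startswith l ['+'] = (l.head? == some '+') := by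
  rcases l with _ | ⟨c, t⟩
  · rfl
  · simp [PySem.Chars.startswith, List.isPrefixOf, eq_comm]

theorem contains_space_eq : (fun c => ([' '] : List Char).contains c) = (fun c => c == ' ') := by
  funext c; by_cases h : c = ' ' <;> simp [h]

theorem head?_stripChars (cs : List Char) :
    (PySem.Chars.stripChars cs [' ']).head? = (cs.dropWhile (· == ' ')).head? := by
  unfold PySem.Chars.stripChars
  rw [show (fun c => ([' '] : List Char).contains c) = (fun c => c == ' ') from contains_space_eq]
  rcases hd : cs.dropWhile (· == ' ') with _ | ⟨c, t⟩
  · simp [hd]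
  · have hc : (c == ' ') = false := by
      have := List.head?_dropWhile_not (p := (· == ' ')) (l := cs)
      rw [hd] at this; simpa using this
    have h2 : (t.reverse ++ [c]).dropWhile (· == ' ')
        = (t.reverse.dropWhile (· == ' ')) ++ [c] ∨
        (t.reverse ++ [c]).dropWhile (· == ' ') = [c] := by
      induction t.reverse with
      | nil => right; simp [List.dropWhile_cons, hc]
      | cons a l ih =>
        by_cases ha : (a == ' ') = true
        · simpa [List.dropWhile_cons, ha] using ih
        · left; simp [List.dropWhile_cons, ha]
    rcases h2 with h2 | h2 <;>
      simp [hd, List.reverse_cons, h2]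

-- B's port computes gNCP of the sliced suffix.
theorem alt_eq_g (line : String) (idx : Int) :
    next_char_not_plus_alt line idx = gNCP (PySem.List.slice line.toList (some idx) none) := by
  unfold next_char_not_plus_alt gNCP
  rw [PySem.Str.startswith_eq, PySem.Str.toList_stripChars, PySem.Str.toList_slice]
  rw [show ("+" : String).toList = ['+'] from rfl, show (" " : String).toList = [' '] from rfl]
  rw [PySem.Chars.slice_eq_listSlice, startswith_plus, head?_stripChars]

-- A's loop at a non-negative index computes gNCP of the dropped suffix.
theorem loopA_nonneg (cs : List Char) (j fuel : Nat) (hf : cs.length - j ≤ fuel) :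
    nextCharLoopA cs (j : Int) fuel = gNCP (cs.drop j) := by
  induction fuel generalizing j with
  | zero =>
    have : cs.length ≤ j := by omega
    rw [List.drop_eq_nil_of_le this]
    simp [nextCharLoopA, gNCP]
  | succ f ih =>
    by_cases hlt : j < cs.length
    · have hget : PySem.List.pyGet? cs (j : Int) = some cs[j] := by
        simp [PySem.List.pyGet?, PySem.List.pyIdx?, hlt]
      have hdrop : cs.drop j = cs[j] :: cs.drop (j + 1) :=
        List.drop_eq_getElem_cons hlt
      simp only [nextCharLoopA, hget]
      rw [if_pos (by exact_mod_cast hlt)]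
      by_cases hc : cs[j] = ' '
      · have hcast : ((j : Int) + 1) = ((j + 1 : Nat) : Int) := by push_cast; ring
        rw [if_neg (by simpa using hc), hcast, ih (j + 1) (by omega), hdrop, hc, gNCP_space]
      · rw [if_pos (by simpa using hc), hdrop, gNCP_nonspace _ _ (by simpa using hc)]
    · unfold nextCharLoopA
      rw [if_neg (by exact_mod_cast hlt)]
      rw [List.drop_eq_nil_of_le (by omega)]
      rfl

-- A's loop at a negative index -k (1 ≤ k ≤ len): it scans the suffix; if the suffix is all
-- spaces the index crosses 0 and the loop restarts at the front of the string.
theorem loopA_neg (cs : List Char) (k fuel : Nat) (hk1 : 1 ≤ k) (hk2 : k ≤ cs.length)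
    (hf : cs.length + k ≤ fuel) :
    nextCharLoopA cs (-(k : Int)) fuel
      = (if (cs.drop (cs.length - k)).all (· == ' ') then gNCP cs
         else gNCP (cs.drop (cs.length - k))) := by
  induction k generalizing fuel with
  | zero => omega
  | succ k ih =>
    obtain ⟨f, rfl⟩ : ∃ f, fuel = f + 1 := ⟨fuel - 1, by omega⟩
    have hlt : -((k + 1 : Nat) : Int) < (cs.length : Int) := by push_cast; omega
    have hidx : cs.length - (k + 1) < cs.length := by omega
    have hget : PySem.List.pyGet? cs (-((k + 1 : Nat) : Int)) = some cs[cs.length - (k+1)] := by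
      have h1 : PySem.List.pyIdx? cs.length (-((k + 1 : Nat) : Int)) = some (cs.length - (k+1)) := by
        unfold PySem.List.pyIdx?
        have c1 : ¬ (0 ≤ -((k + 1 : Nat) : Int)) := by push_cast; omega
        have c2 : -(cs.length : Int) ≤ -((k + 1 : Nat) : Int) := by push_cast; omega
        rw [if_neg c1, if_pos c2]
        simp only [neg_neg, Int.toNat_natCast]
      unfold PySem.List.pyGet?
      rw [h1, Option.bind_some, List.getElem?_eq_getElem hidx]
    have hdrop : cs.drop (cs.length - (k + 1)) = cs[cs.length - (k+1)] :: cs.drop (cs.length - k) := by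
      rw [List.drop_eq_getElem_cons hidx]; congr 2; omega
    simp only [nextCharLoopA, hget, if_pos hlt]
    by_cases hc : cs[cs.length - (k+1)] = ' '
    · rw [if_neg (by simpa using hc)]
      have hstep : -((k + 1 : Nat) : Int) + 1 = -((k : Nat) : Int) := by push_cast; ring
      rw [hstep]
      rcases Nat.eq_zero_or_pos k with hk0 | hkpos
      · subst hk0
        rw [show -((0 : Nat) : Int) = ((0 : Nat) : Int) by norm_num]
        rw [loopA_nonneg cs 0 f (by omega)]
        have hnil : cs.drop (cs.length - 0) = [] := List.drop_eq_nil_of_le (by omega)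
        have hall : (cs.drop (cs.length - (0+1))).all (· == ' ') = true := by
          rw [hdrop, hc, hnil]; simp
        rw [if_pos hall]; simp
      · rw [ih f hkpos (by omega) (by omega)]
        have hcond : (cs.drop (cs.length - (k+1))).all (· == ' ')
            = (cs.drop (cs.length - k)).all (· == ' ') := by
          rw [hdrop, hc]; simp
        rw [hcond, hdrop, hc, gNCP_space]
    · have hcb : (cs[cs.length - (k+1)] == ' ') = false := by simpa using hc
      rw [if_pos (by simpa using hc)]
      have hnall : ¬ (cs.drop (cs.length - (k+1))).all (· == ' ') = true := by
        rw [hdrop]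
        simp only [List.all_cons, Bool.and_eq_true, hcb]
        simp
      rw [if_neg hnall, hdrop, gNCP_nonspace _ _ hcb]

-- ===== VERDICT (by name: the statement is the Claim_ definition above) =====
theorem next_char_not_plus_spec : Claim_unchanged_next_char_not_plus := by
  intro line idx _ hpre hnd
  rw [alt_eq_g]
  unfold next_char_not_plus
  by_cases hpos : 0 ≤ idx
  · obtain ⟨j, rfl⟩ : ∃ j : Nat, idx = (j : Int) := ⟨idx.toNat, by omega⟩
    rw [loopA_nonneg line.toList j _ (by omega)]
    rw [PySem.List.slice_from_natCast]
  · have hneg : idx < 0 := by omega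
    obtain ⟨k, hkk⟩ : ∃ k : Nat, idx = -(k : Int) := ⟨(-idx).toNat, by omega⟩
    subst hkk
    have hk1 : 1 ≤ k := by omega
    have hk2 : k ≤ line.toList.length := by
      unfold Pre_next_char_not_plus at hpre; omega
    rw [loopA_neg line.toList k _ hk1 hk2 (by omega),
        PySem.List.slice_from_neg_natCast line.toList k (by omega)]
    by_cases hall : (line.toList.drop (line.toList.length - k)).all (· == ' ') = true
    · rw [if_pos hall, gNCP_allspace _ hall]
      -- ¬ D_ forces the first non-space of line to not be '+', so gNCP line = true
      unfold D_next_char_not_plus at hnd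
      push_neg at hnd
      have hne : (line.toList.dropWhile (· == ' ')).head? ≠ some '+' := by
        apply hnd hneg (by unfold Pre_next_char_not_plus at hpre; omega)
        have : (-(-(k : Int))).toNat = k := by omega
        rw [this]; exact hall
      unfold gNCP
      simp [hne]
    · rw [if_neg hall]

theorem next_char_not_plus_changed : Claim_changed_next_char_not_plus := by
  unfold Claim_changed_next_char_not_plus; decide

theorem next_char_not_plus_tight : Claim_exact_next_char_not_plus := by
  intro line idx _ hpre hd
  obtain ⟨hneg, hge, hall, hhead⟩ := hd
  obtain ⟨k, hkk⟩ : ∃ k : Nat, idx = -(k : Int) := ⟨(-idx).toNat, by omega⟩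
  subst hkk
  have hallk : (line.toList.drop (line.toList.length - k)).all (· == ' ') = true := by
    have : (-(-(k : Int))).toNat = k := by omega
    rwa [this] at hall
  unfold next_char_not_plus
  rw [alt_eq_g, PySem.List.slice_from_neg_natCast line.toList k (by omega)]
  rw [loopA_neg line.toList k _ (by omega) (by omega) (by omega)]
  rw [if_pos hallk, gNCP_allspace _ hallk]
  unfold gNCP
  simp [hhead]
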